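-- pv_equiv track=rewrite | github.com/seihwanMoon/mfgstudio | backend/services/pycaret_service.py | _infer_model_family
-- ===== SOURCE A (Python) =====
-- def _infer_model_family(module_type: str, estimator_id: str, name: str, reference: str) -> tuple[str, list[str]]:
--     haystack = " ".join([module_type, estimator_id, name, reference]).lower()
--     tags = {module_type}
--
--     if "turbo" in haystack:
--         tags.add("turbo")
--     if any(token in haystack for token in ["linear", "lasso", "ridge", "elastic", "lar", "omp", "bayesian ridge", "least angle"]):
--         family = "linear"
--         tags.update({"interpretable", "linear"})
--     elif any(token in haystack for token in ["lightgbm", "xgboost", "catboost", "gradient boosting", "gradientboosting", "adaboost", "gbm", "boost"]):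
--         family = "boosting"
--         tags.update({"ensemble", "boosting", "tree_based"})
--     elif any(token in haystack for token in ["random forest", "extra trees", "forest", "bagging", "voting", "stacking", "ensemble"]):
--         family = "ensemble"
--         tags.update({"ensemble", "tree_based"})
--     elif any(token in haystack for token in ["tree", "decision tree", "dt"]):
--         family = "tree"
--         tags.add("tree_based")
--     elif any(token in haystack for token in ["knn", "neighbors", "neighbor"]):
--         family = "neighbors"
--         tags.add("distance_based")
--     elif any(token in haystack for token in ["svm", "support vector"]):
--         family = "svm"
--         tags.add("margin_based")
--     elif any(token in haystack for token in ["naive bayes", "bayes", "qda", "lda"]):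
--         family = "probabilistic"
--         tags.add("interpretable")
--     elif any(token in haystack for token in ["k-means", "cluster", "hclust", "meanshift", "spectral", "affinity"]):
--         family = "clustering"
--         tags.add("distance_based")
--     elif any(token in haystack for token in ["outlier", "iforest", "anomaly", "lof", "svm"]):
--         family = "anomaly"
--         tags.add("outlier_detection")
--     elif any(token in haystack for token in ["arima", "ets", "prophet", "naive", "trend", "croston", "theta"]):
--         family = "forecasting"
--         tags.add("time_series")
--     else:
--         family = "other"
--
--     if module_type in {"classification", "regression"} and "interpretable" not in tags and family in {"linear", "tree", "probabilistic"}: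
--         tags.add("interpretable")
--
--     return family, sorted(tags)
-- ===== SOURCE B (Python) =====
-- _RULES = [
--     (("linear", "lasso", "ridge", "elastic", "lar", "omp", "bayesian ridge", "least angle"),
--      "linear", ("interpretable", "linear")),
--     (("lightgbm", "xgboost", "catboost", "gradient boosting", "gradientboosting", "adaboost", "gbm", "boost"),
--      "boosting", ("ensemble", "boosting", "tree_based")),
--     (("random forest", "extra trees", "forest", "bagging", "voting", "stacking", "ensemble"),
--      "ensemble", ("ensemble", "tree_based")),
--     (("tree", "decision tree", "dt"), "tree", ("tree_based",)),
--     (("knn", "neighbors", "neighbor"), "neighbors", ("distance_based",)),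
--     (("svm", "support vector"), "svm", ("margin_based",)),
--     (("naive bayes", "bayes", "qda", "lda"), "probabilistic", ("interpretable",)),
--     (("k-means", "cluster", "hclust", "meanshift", "spectral", "affinity"), "clustering", ("distance_based",)),
--     (("outlier", "iforest", "anomaly", "lof", "svm"), "anomaly", ("outlier_detection",)),
--     (("arima", "ets", "prophet", "naive", "trend", "croston", "theta"), "forecasting", ("time_series",)),
-- ]
--
-- # Inverted index: token -> priority of the earliest rule containing it.
-- _TOKEN_PRIO = {}
-- for _p, (_toks, _f, _e) in enumerate(_RULES):
--     for _t in _toks: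
--         _TOKEN_PRIO.setdefault(_t, _p)
--
--
-- def _infer_model_family(module_type: str, estimator_id: str, name: str, reference: str) -> tuple[str, list[str]]:
--     haystack = " ".join([module_type, estimator_id, name, reference]).lower()
--     best = min([p for t, p in _TOKEN_PRIO.items() if t in haystack], default=len(_RULES))
--     tags = {module_type}
--     if "turbo" in haystack:
--         tags.add("turbo")
--     if best < len(_RULES):
--         family = _RULES[best][1]
--         tags.update(_RULES[best][2])
--     else:
--         family = "other"
--     if module_type in {"classification", "regression"} and "interpretable" not in tags and family in {"linear", "tree", "probabilistic"}:
--         tags.add("interpretable")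
--     return family, sorted(tags)
-- ===== Notes on version B (the rewrite author's own statement) =====
-- stated objective: alternative
-- what changed: Instead of testing ten rules in priority order and stopping at the first match, B builds an inverted token-to-priority index once and selects the family as the minimum priority over all matched tokens (default = no match), then looks the family and its tags up in the rule table.
import Mathlib
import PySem

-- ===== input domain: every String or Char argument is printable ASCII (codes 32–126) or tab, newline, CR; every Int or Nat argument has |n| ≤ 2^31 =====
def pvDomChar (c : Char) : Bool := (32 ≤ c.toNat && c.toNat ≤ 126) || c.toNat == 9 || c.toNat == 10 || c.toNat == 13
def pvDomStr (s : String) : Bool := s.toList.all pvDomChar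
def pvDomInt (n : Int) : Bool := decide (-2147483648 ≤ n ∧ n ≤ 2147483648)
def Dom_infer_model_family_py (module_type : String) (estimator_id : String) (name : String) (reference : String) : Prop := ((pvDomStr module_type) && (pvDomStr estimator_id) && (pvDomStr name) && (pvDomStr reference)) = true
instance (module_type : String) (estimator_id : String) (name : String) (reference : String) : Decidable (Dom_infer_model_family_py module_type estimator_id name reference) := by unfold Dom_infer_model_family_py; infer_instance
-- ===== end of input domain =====

-- B replaces A's ten-branch first-match elif chain by an inverted token→priority index:
-- it takes the MINIMUM priority over all matched tokens (no ordered rule scan, no break).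
-- Objective: alternative. Same return value everywhere.

-- ===== PORT A =====
-- 'any(token in haystack for token in toks)'
def pvAnyIn (toks : List String) (hay : String) : Bool := toks.any (fun t => PySem.Str.isIn t hay)

def infer_model_family_py (module_type : String) (estimator_id : String) (name : String) (reference : String) : String × List String :=
  let haystack := PySem.Str.lower (PySem.Str.join " " [module_type, estimator_id, name, reference])
  let tags : PySem.Set String := PySem.Set.ofList [module_type]
  let tags := if PySem.Str.isIn "turbo" haystack then PySem.Set.add tags "turbo" else tags
  let ft : String × PySem.Set String :=
    if pvAnyIn ["linear", "lasso", "ridge", "elastic", "lar", "omp", "bayesian ridge", "least angle"] haystack then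
      ("linear", PySem.Set.update tags ["interpretable", "linear"])
    else if pvAnyIn ["lightgbm", "xgboost", "catboost", "gradient boosting", "gradientboosting", "adaboost", "gbm", "boost"] haystack then
      ("boosting", PySem.Set.update tags ["ensemble", "boosting", "tree_based"])
    else if pvAnyIn ["random forest", "extra trees", "forest", "bagging", "voting", "stacking", "ensemble"] haystack then
      ("ensemble", PySem.Set.update tags ["ensemble", "tree_based"])
    else if pvAnyIn ["tree", "decision tree", "dt"] haystack then
      ("tree", PySem.Set.add tags "tree_based")
    else if pvAnyIn ["knn", "neighbors", "neighbor"] haystack then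
      ("neighbors", PySem.Set.add tags "distance_based")
    else if pvAnyIn ["svm", "support vector"] haystack then
      ("svm", PySem.Set.add tags "margin_based")
    else if pvAnyIn ["naive bayes", "bayes", "qda", "lda"] haystack then
      ("probabilistic", PySem.Set.add tags "interpretable")
    else if pvAnyIn ["k-means", "cluster", "hclust", "meanshift", "spectral", "affinity"] haystack then
      ("clustering", PySem.Set.add tags "distance_based")
    else if pvAnyIn ["outlier", "iforest", "anomaly", "lof", "svm"] haystack then
      ("anomaly", PySem.Set.add tags "outlier_detection")
    else if pvAnyIn ["arima", "ets", "prophet", "naive", "trend", "croston", "theta"] haystack then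
      ("forecasting", PySem.Set.add tags "time_series")
    else
      ("other", tags)
  let family := ft.1
  let tags := ft.2
  let tags :=
    if (module_type == "classification" || module_type == "regression")
        && !(PySem.Set.contains tags "interpretable")
        && (family == "linear" || family == "tree" || family == "probabilistic") then
      PySem.Set.add tags "interpretable"
    else tags
  (family, PySem.List.sorted tags (fun x => x) false)

-- ===== PORT B =====
-- Source B's _RULES table
def pvRules : List (List String × String × List String) :=
  [ (["linear", "lasso", "ridge", "elastic", "lar", "omp", "bayesian ridge", "least angle"], "linear", ["interpretable", "linear"]),
    (["lightgbm", "xgboost", "catboost", "gradient boosting", "gradientboosting", "adaboost", "gbm", "boost"], "boosting", ["ensemble", "boosting", "tree_based"]),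
    (["random forest", "extra trees", "forest", "bagging", "voting", "stacking", "ensemble"], "ensemble", ["ensemble", "tree_based"]),
    (["tree", "decision tree", "dt"], "tree", ["tree_based"]),
    (["knn", "neighbors", "neighbor"], "neighbors", ["distance_based"]),
    (["svm", "support vector"], "svm", ["margin_based"]),
    (["naive bayes", "bayes", "qda", "lda"], "probabilistic", ["interpretable"]),
    (["k-means", "cluster", "hclust", "meanshift", "spectral", "affinity"], "clustering", ["distance_based"]),
    (["outlier", "iforest", "anomaly", "lof", "svm"], "anomaly", ["outlier_detection"]),
    (["arima", "ets", "prophet", "naive", "trend", "croston", "theta"], "forecasting", ["time_series"]) ]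

-- Source B's module-level loop building the inverted index _TOKEN_PRIO (dict.setdefault)
def pvTokenPrio : PySem.Dict String Int :=
  (PySem.List.enumerate pvRules).foldl
    (fun d pr => pr.2.1.foldl (fun d t => d.setdefault t pr.1) d) (PySem.Dict.mk [])

def infer_model_family_py_alt (module_type : String) (estimator_id : String) (name : String) (reference : String) : String × List String :=
  let haystack := PySem.Str.lower (PySem.Str.join " " [module_type, estimator_id, name, reference])
  -- min([p for t, p in _TOKEN_PRIO.items() if t in haystack], default=len(_RULES))
  let best : Int :=
    PySem.List.minD
      (pvTokenPrio.items.filterMap (fun tp => if PySem.Str.isIn tp.1 haystack then some tp.2 else none))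
      (fun x => x) (pvRules.length : Int)
  let tags : PySem.Set String := PySem.Set.ofList [module_type]
  let tags := if PySem.Str.isIn "turbo" haystack then PySem.Set.add tags "turbo" else tags
  let ft : String × PySem.Set String :=
    if best < (pvRules.length : Int) then
      match PySem.List.pyGet? pvRules best with   -- _RULES[best]; in range: 0 ≤ best < len(_RULES)
      | some r => (r.2.1, PySem.Set.update tags r.2.2)
      | none => ("other", tags)
    else ("other", tags)
  let family := ft.1
  let tags := ft.2
  let tags :=
    if (module_type == "classification" || module_type == "regression")
        && !(PySem.Set.contains tags "interpretable")
        && (family == "linear" || family == "tree" || family == "probabilistic") then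
      PySem.Set.add tags "interpretable"
    else tags
  (family, PySem.List.sorted tags (fun x => x) false)

-- ===== PRECONDITION & SPEC =====
def Spec_infer_model_family_py (module_type : String) (estimator_id : String) (name : String) (reference : String) (out : String × List String) : Prop := out = infer_model_family_py_alt module_type estimator_id name reference
instance (module_type : String) (estimator_id : String) (name : String) (reference : String) (out : String × List String) : Decidable (Spec_infer_model_family_py module_type estimator_id name reference out) := by unfold Spec_infer_model_family_py; infer_instance

-- ===== CLAIM (what is proved, stated in full; the proofs are below) =====
def Claim_equal_infer_model_family_py : Prop := ∀ (module_type : String) (estimator_id : String) (name : String) (reference : String), Dom_infer_model_family_py module_type estimator_id name reference → Spec_infer_model_family_py module_type estimator_id name reference (infer_model_family_py module_type estimator_id name reference)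

-- ===== LEMMAS AND PROOFS =====

-- the inverted index, written out (Source B's construction loop, evaluated)
set_option maxRecDepth 8192 in
theorem pvItems_eq : pvTokenPrio.items =
  [ ("linear", 0), ("lasso", 0), ("ridge", 0), ("elastic", 0), ("lar", 0), ("omp", 0), ("bayesian ridge", 0), ("least angle", 0),
    ("lightgbm", 1), ("xgboost", 1), ("catboost", 1), ("gradient boosting", 1), ("gradientboosting", 1), ("adaboost", 1), ("gbm", 1), ("boost", 1),
    ("random forest", 2), ("extra trees", 2), ("forest", 2), ("bagging", 2), ("voting", 2), ("stacking", 2), ("ensemble", 2),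
    ("tree", 3), ("decision tree", 3), ("dt", 3),
    ("knn", 4), ("neighbors", 4), ("neighbor", 4),
    ("svm", 5), ("support vector", 5),
    ("naive bayes", 6), ("bayes", 6), ("qda", 6), ("lda", 6),
    ("k-means", 7), ("cluster", 7), ("hclust", 7), ("meanshift", 7), ("spectral", 7), ("affinity", 7),
    ("outlier", 8), ("iforest", 8), ("anomaly", 8), ("lof", 8),
    ("arima", 9), ("ets", 9), ("prophet", 9), ("naive", 9), ("trend", 9), ("croston", 9), ("theta", 9) ] := by decide

-- min(xs, default=d) with identity key picks the value i when i is a member and a lower bound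
theorem minD_int_eq (ps : List Int) (i d : Int) (hi : i ∈ ps) (hlb : ∀ p ∈ ps, i ≤ p) :
    PySem.List.minD ps (fun x => x) d = i := by
  have h1 : PySem.List.minD ps (fun x => x) d = (PySem.List.min? ps (fun x => x)).getD d := rfl
  rcases hmo : PySem.List.min? ps (fun x => x) with _ | m
  · rw [PySem.List.min?_eq_none_iff] at hmo; subst hmo; simp at hi
  · have hm := PySem.List.min?_mem hmo
    have hmin := PySem.List.min?_isMin hmo
    rw [h1, hmo]
    simp only [Option.getD_some]
    exact le_antisymm (hmin i hi) (hlb m hm)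

-- the token list of rule p (proof helper)
def pvMatchTokens (p : Int) : List String :=
  match PySem.List.pyGet? pvRules p with
  | some r => r.1
  | none => []

-- every matched priority is the index of a rule one of whose tokens matches
theorem pv_mem_ps_bound (hay : String) :
    ∀ p ∈ pvTokenPrio.items.filterMap (fun tp => if PySem.Str.isIn tp.1 hay then some tp.2 else none),
      0 ≤ p ∧ p ≤ 9 ∧ pvAnyIn (pvMatchTokens p) hay = true := by
  intro p hp
  rcases List.mem_filterMap.mp hp with ⟨tq, htq, hq⟩
  rw [pvItems_eq] at htq
  by_cases hin : PySem.Str.isIn tq.1 hay = true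
  · rw [if_pos hin] at hq
    obtain rfl : tq.2 = p := Option.some.inj hq
    fin_cases htq <;> simp_all [pvMatchTokens, pvRules, pvAnyIn, PySem.List.pyGet?, PySem.List.pyIdx?]
  · rw [if_neg hin] at hq; cases hq

-- A's elif chain equals B's min-over-matched-priorities selection
set_option maxRecDepth 8192 in
set_option maxHeartbeats 2000000 in
theorem sel_eq (hay : String) (tags : PySem.Set String) :
    (if pvAnyIn ["linear", "lasso", "ridge", "elastic", "lar", "omp", "bayesian ridge", "least angle"] hay then
      ("linear", PySem.Set.update tags ["interpretable", "linear"])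
    else if pvAnyIn ["lightgbm", "xgboost", "catboost", "gradient boosting", "gradientboosting", "adaboost", "gbm", "boost"] hay then
      ("boosting", PySem.Set.update tags ["ensemble", "boosting", "tree_based"])
    else if pvAnyIn ["random forest", "extra trees", "forest", "bagging", "voting", "stacking", "ensemble"] hay then
      ("ensemble", PySem.Set.update tags ["ensemble", "tree_based"])
    else if pvAnyIn ["tree", "decision tree", "dt"] hay then
      ("tree", PySem.Set.add tags "tree_based")
    else if pvAnyIn ["knn", "neighbors", "neighbor"] hay then
      ("neighbors", PySem.Set.add tags "distance_based")
    else if pvAnyIn ["svm", "support vector"] hay then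
      ("svm", PySem.Set.add tags "margin_based")
    else if pvAnyIn ["naive bayes", "bayes", "qda", "lda"] hay then
      ("probabilistic", PySem.Set.add tags "interpretable")
    else if pvAnyIn ["k-means", "cluster", "hclust", "meanshift", "spectral", "affinity"] hay then
      ("clustering", PySem.Set.add tags "distance_based")
    else if pvAnyIn ["outlier", "iforest", "anomaly", "lof", "svm"] hay then
      ("anomaly", PySem.Set.add tags "outlier_detection")
    else if pvAnyIn ["arima", "ets", "prophet", "naive", "trend", "croston", "theta"] hay then
      ("forecasting", PySem.Set.add tags "time_series")
    else
      ("other", tags) : String × PySem.Set String)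
    =
    (if PySem.List.minD
          (pvTokenPrio.items.filterMap (fun tp => if PySem.Str.isIn tp.1 hay then some tp.2 else none))
          (fun x => x) (pvRules.length : Int) < (pvRules.length : Int) then
        match PySem.List.pyGet? pvRules
            (PySem.List.minD
              (pvTokenPrio.items.filterMap (fun tp => if PySem.Str.isIn tp.1 hay then some tp.2 else none))
              (fun x => x) (pvRules.length : Int)) with
        | some r => (r.2.1, PySem.Set.update tags r.2.2)
        | none => ("other", tags)
      else ("other", tags)) := by
  cases h0 : pvAnyIn ["linear", "lasso", "ridge", "elastic", "lar", "omp", "bayesian ridge", "least angle"] hay with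
  | true =>
    have hmem : (0 : Int) ∈ pvTokenPrio.items.filterMap (fun tp => if PySem.Str.isIn tp.1 hay then some tp.2 else none) := by
      simp only [pvAnyIn, List.any_cons, List.any_nil, Bool.or_false, Bool.or_eq_true] at h0
      rcases h0 with ht|ht|ht|ht|ht|ht|ht|ht
      · exact List.mem_filterMap.mpr ⟨("linear", 0), by rw [pvItems_eq]; decide, by simp only [ht]; rfl⟩
      · exact List.mem_filterMap.mpr ⟨("lasso", 0), by rw [pvItems_eq]; decide, by simp only [ht]; rfl⟩
      · exact List.mem_filterMap.mpr ⟨("ridge", 0), by rw [pvItems_eq]; decide, by simp only [ht]; rfl⟩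
      · exact List.mem_filterMap.mpr ⟨("elastic", 0), by rw [pvItems_eq]; decide, by simp only [ht]; rfl⟩
      · exact List.mem_filterMap.mpr ⟨("lar", 0), by rw [pvItems_eq]; decide, by simp only [ht]; rfl⟩
      · exact List.mem_filterMap.mpr ⟨("omp", 0), by rw [pvItems_eq]; decide, by simp only [ht]; rfl⟩
      · exact List.mem_filterMap.mpr ⟨("bayesian ridge", 0), by rw [pvItems_eq]; decide, by simp only [ht]; rfl⟩
      · exact List.mem_filterMap.mpr ⟨("least angle", 0), by rw [pvItems_eq]; decide, by simp only [ht]; rfl⟩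
    have hlb : ∀ p ∈ pvTokenPrio.items.filterMap (fun tp => if PySem.Str.isIn tp.1 hay then some tp.2 else none), (0 : Int) ≤ p := by
      intro p hp
      obtain ⟨hp0, hp9, hm⟩ := pv_mem_ps_bound hay p hp
      by_contra hlt
      rw [not_le] at hlt
      omega
    rw [minD_int_eq _ 0 _ hmem hlb]
    norm_num [pvRules, PySem.Set.update, PySem.List.pyGet?, PySem.List.pyIdx?]
  | false =>
    cases h1 : pvAnyIn ["lightgbm", "xgboost", "catboost", "gradient boosting", "gradientboosting", "adaboost", "gbm", "boost"] hay with
    | true =>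
      have hmem : (1 : Int) ∈ pvTokenPrio.items.filterMap (fun tp => if PySem.Str.isIn tp.1 hay then some tp.2 else none) := by
        simp only [pvAnyIn, List.any_cons, List.any_nil, Bool.or_false, Bool.or_eq_true] at h1
        rcases h1 with ht|ht|ht|ht|ht|ht|ht|ht
        · exact List.mem_filterMap.mpr ⟨("lightgbm", 1), by rw [pvItems_eq]; decide, by simp only [ht]; rfl⟩
        · exact List.mem_filterMap.mpr ⟨("xgboost", 1), by rw [pvItems_eq]; decide, by simp only [ht]; rfl⟩
        · exact List.mem_filterMap.mpr ⟨("catboost", 1), by rw [pvItems_eq]; decide, by simp only [ht]; rfl⟩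
        · exact List.mem_filterMap.mpr ⟨("gradient boosting", 1), by rw [pvItems_eq]; decide, by simp only [ht]; rfl⟩
        · exact List.mem_filterMap.mpr ⟨("gradientboosting", 1), by rw [pvItems_eq]; decide, by simp only [ht]; rfl⟩
        · exact List.mem_filterMap.mpr ⟨("adaboost", 1), by rw [pvItems_eq]; decide, by simp only [ht]; rfl⟩
        · exact List.mem_filterMap.mpr ⟨("gbm", 1), by rw [pvItems_eq]; decide, by simp only [ht]; rfl⟩
        · exact List.mem_filterMap.mpr ⟨("boost", 1), by rw [pvItems_eq]; decide, by simp only [ht]; rfl⟩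
      have hlb : ∀ p ∈ pvTokenPrio.items.filterMap (fun tp => if PySem.Str.isIn tp.1 hay then some tp.2 else none), (1 : Int) ≤ p := by
        intro p hp
        obtain ⟨hp0, hp9, hm⟩ := pv_mem_ps_bound hay p hp
        by_contra hlt
        rw [not_le] at hlt
        interval_cases p <;> simp_all [pvMatchTokens, pvRules, pvAnyIn, PySem.List.pyGet?, PySem.List.pyIdx?]
      rw [minD_int_eq _ 1 _ hmem hlb]
      norm_num [pvRules, PySem.Set.update, PySem.List.pyGet?, PySem.List.pyIdx?]
    | false =>
      cases h2 : pvAnyIn ["random forest", "extra trees", "forest", "bagging", "voting", "stacking", "ensemble"] hay with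
      | true =>
        have hmem : (2 : Int) ∈ pvTokenPrio.items.filterMap (fun tp => if PySem.Str.isIn tp.1 hay then some tp.2 else none) := by
          simp only [pvAnyIn, List.any_cons, List.any_nil, Bool.or_false, Bool.or_eq_true] at h2
          rcases h2 with ht|ht|ht|ht|ht|ht|ht
          · exact List.mem_filterMap.mpr ⟨("random forest", 2), by rw [pvItems_eq]; decide, by simp only [ht]; rfl⟩
          · exact List.mem_filterMap.mpr ⟨("extra trees", 2), by rw [pvItems_eq]; decide, by simp only [ht]; rfl⟩
          · exact List.mem_filterMap.mpr ⟨("forest", 2), by rw [pvItems_eq]; decide, by simp only [ht]; rfl⟩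
          · exact List.mem_filterMap.mpr ⟨("bagging", 2), by rw [pvItems_eq]; decide, by simp only [ht]; rfl⟩
          · exact List.mem_filterMap.mpr ⟨("voting", 2), by rw [pvItems_eq]; decide, by simp only [ht]; rfl⟩
          · exact List.mem_filterMap.mpr ⟨("stacking", 2), by rw [pvItems_eq]; decide, by simp only [ht]; rfl⟩
          · exact List.mem_filterMap.mpr ⟨("ensemble", 2), by rw [pvItems_eq]; decide, by simp only [ht]; rfl⟩
        have hlb : ∀ p ∈ pvTokenPrio.items.filterMap (fun tp => if PySem.Str.isIn tp.1 hay then some tp.2 else none), (2 : Int) ≤ p := by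
          intro p hp
          obtain ⟨hp0, hp9, hm⟩ := pv_mem_ps_bound hay p hp
          by_contra hlt
          rw [not_le] at hlt
          interval_cases p <;> simp_all [pvMatchTokens, pvRules, pvAnyIn, PySem.List.pyGet?, PySem.List.pyIdx?]
        rw [minD_int_eq _ 2 _ hmem hlb]
        norm_num [pvRules, PySem.Set.update, PySem.List.pyGet?, PySem.List.pyIdx?]
        exact ⟨rfl, rfl⟩
      | false =>
        cases h3 : pvAnyIn ["tree", "decision tree", "dt"] hay with
        | true =>
          have hmem : (3 : Int) ∈ pvTokenPrio.items.filterMap (fun tp => if PySem.Str.isIn tp.1 hay then some tp.2 else none) := by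
            simp only [pvAnyIn, List.any_cons, List.any_nil, Bool.or_false, Bool.or_eq_true] at h3
            rcases h3 with ht|ht|ht
            · exact List.mem_filterMap.mpr ⟨("tree", 3), by rw [pvItems_eq]; decide, by simp only [ht]; rfl⟩
            · exact List.mem_filterMap.mpr ⟨("decision tree", 3), by rw [pvItems_eq]; decide, by simp only [ht]; rfl⟩
            · exact List.mem_filterMap.mpr ⟨("dt", 3), by rw [pvItems_eq]; decide, by simp only [ht]; rfl⟩
          have hlb : ∀ p ∈ pvTokenPrio.items.filterMap (fun tp => if PySem.Str.isIn tp.1 hay then some tp.2 else none), (3 : Int) ≤ p := by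
            intro p hp
            obtain ⟨hp0, hp9, hm⟩ := pv_mem_ps_bound hay p hp
            by_contra hlt
            rw [not_le] at hlt
            interval_cases p <;> simp_all [pvMatchTokens, pvRules, pvAnyIn, PySem.List.pyGet?, PySem.List.pyIdx?]
          rw [minD_int_eq _ 3 _ hmem hlb]
          norm_num [pvRules, PySem.Set.update, PySem.List.pyGet?, PySem.List.pyIdx?]
          exact ⟨rfl, rfl⟩
        | false =>
          cases h4 : pvAnyIn ["knn", "neighbors", "neighbor"] hay with
          | true =>
            have hmem : (4 : Int) ∈ pvTokenPrio.items.filterMap (fun tp => if PySem.Str.isIn tp.1 hay then some tp.2 else none) := by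
              simp only [pvAnyIn, List.any_cons, List.any_nil, Bool.or_false, Bool.or_eq_true] at h4
              rcases h4 with ht|ht|ht
              · exact List.mem_filterMap.mpr ⟨("knn", 4), by rw [pvItems_eq]; decide, by simp only [ht]; rfl⟩
              · exact List.mem_filterMap.mpr ⟨("neighbors", 4), by rw [pvItems_eq]; decide, by simp only [ht]; rfl⟩
              · exact List.mem_filterMap.mpr ⟨("neighbor", 4), by rw [pvItems_eq]; decide, by simp only [ht]; rfl⟩
            have hlb : ∀ p ∈ pvTokenPrio.items.filterMap (fun tp => if PySem.Str.isIn tp.1 hay then some tp.2 else none), (4 : Int) ≤ p := by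
              intro p hp
              obtain ⟨hp0, hp9, hm⟩ := pv_mem_ps_bound hay p hp
              by_contra hlt
              rw [not_le] at hlt
              interval_cases p <;> simp_all [pvMatchTokens, pvRules, pvAnyIn, PySem.List.pyGet?, PySem.List.pyIdx?]
            rw [minD_int_eq _ 4 _ hmem hlb]
            norm_num [pvRules, PySem.Set.update, PySem.List.pyGet?, PySem.List.pyIdx?]
            exact ⟨rfl, rfl⟩
          | false =>
            cases h5 : pvAnyIn ["svm", "support vector"] hay with
            | true =>
              have hmem : (5 : Int) ∈ pvTokenPrio.items.filterMap (fun tp => if PySem.Str.isIn tp.1 hay then some tp.2 else none) := by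
                simp only [pvAnyIn, List.any_cons, List.any_nil, Bool.or_false, Bool.or_eq_true] at h5
                rcases h5 with ht|ht
                · exact List.mem_filterMap.mpr ⟨("svm", 5), by rw [pvItems_eq]; decide, by simp only [ht]; rfl⟩
                · exact List.mem_filterMap.mpr ⟨("support vector", 5), by rw [pvItems_eq]; decide, by simp only [ht]; rfl⟩
              have hlb : ∀ p ∈ pvTokenPrio.items.filterMap (fun tp => if PySem.Str.isIn tp.1 hay then some tp.2 else none), (5 : Int) ≤ p := by
                intro p hp
                obtain ⟨hp0, hp9, hm⟩ := pv_mem_ps_bound hay p hp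
                by_contra hlt
                rw [not_le] at hlt
                interval_cases p <;> simp_all [pvMatchTokens, pvRules, pvAnyIn, PySem.List.pyGet?, PySem.List.pyIdx?]
              rw [minD_int_eq _ 5 _ hmem hlb]
              norm_num [pvRules, PySem.Set.update, PySem.List.pyGet?, PySem.List.pyIdx?]
              exact ⟨rfl, rfl⟩
            | false =>
              cases h6 : pvAnyIn ["naive bayes", "bayes", "qda", "lda"] hay with
              | true =>
                have hmem : (6 : Int) ∈ pvTokenPrio.items.filterMap (fun tp => if PySem.Str.isIn tp.1 hay then some tp.2 else none) := by
                  simp only [pvAnyIn, List.any_cons, List.any_nil, Bool.or_false, Bool.or_eq_true] at h6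
                  rcases h6 with ht|ht|ht|ht
                  · exact List.mem_filterMap.mpr ⟨("naive bayes", 6), by rw [pvItems_eq]; decide, by simp only [ht]; rfl⟩
                  · exact List.mem_filterMap.mpr ⟨("bayes", 6), by rw [pvItems_eq]; decide, by simp only [ht]; rfl⟩
                  · exact List.mem_filterMap.mpr ⟨("qda", 6), by rw [pvItems_eq]; decide, by simp only [ht]; rfl⟩
                  · exact List.mem_filterMap.mpr ⟨("lda", 6), by rw [pvItems_eq]; decide, by simp only [ht]; rfl⟩
                have hlb : ∀ p ∈ pvTokenPrio.items.filterMap (fun tp => if PySem.Str.isIn tp.1 hay then some tp.2 else none), (6 : Int) ≤ p := by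
                  intro p hp
                  obtain ⟨hp0, hp9, hm⟩ := pv_mem_ps_bound hay p hp
                  by_contra hlt
                  rw [not_le] at hlt
                  interval_cases p <;> simp_all [pvMatchTokens, pvRules, pvAnyIn, PySem.List.pyGet?, PySem.List.pyIdx?]
                rw [minD_int_eq _ 6 _ hmem hlb]
                norm_num [pvRules, PySem.Set.update, PySem.List.pyGet?, PySem.List.pyIdx?]
                exact ⟨rfl, rfl⟩
              | false =>
                cases h7 : pvAnyIn ["k-means", "cluster", "hclust", "meanshift", "spectral", "affinity"] hay with
                | true =>
                  have hmem : (7 : Int) ∈ pvTokenPrio.items.filterMap (fun tp => if PySem.Str.isIn tp.1 hay then some tp.2 else none) := by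
                    simp only [pvAnyIn, List.any_cons, List.any_nil, Bool.or_false, Bool.or_eq_true] at h7
                    rcases h7 with ht|ht|ht|ht|ht|ht
                    · exact List.mem_filterMap.mpr ⟨("k-means", 7), by rw [pvItems_eq]; decide, by simp only [ht]; rfl⟩
                    · exact List.mem_filterMap.mpr ⟨("cluster", 7), by rw [pvItems_eq]; decide, by simp only [ht]; rfl⟩
                    · exact List.mem_filterMap.mpr ⟨("hclust", 7), by rw [pvItems_eq]; decide, by simp only [ht]; rfl⟩
                    · exact List.mem_filterMap.mpr ⟨("meanshift", 7), by rw [pvItems_eq]; decide, by simp only [ht]; rfl⟩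
                    · exact List.mem_filterMap.mpr ⟨("spectral", 7), by rw [pvItems_eq]; decide, by simp only [ht]; rfl⟩
                    · exact List.mem_filterMap.mpr ⟨("affinity", 7), by rw [pvItems_eq]; decide, by simp only [ht]; rfl⟩
                  have hlb : ∀ p ∈ pvTokenPrio.items.filterMap (fun tp => if PySem.Str.isIn tp.1 hay then some tp.2 else none), (7 : Int) ≤ p := by
                    intro p hp
                    obtain ⟨hp0, hp9, hm⟩ := pv_mem_ps_bound hay p hp
                    by_contra hlt
                    rw [not_le] at hlt
                    interval_cases p <;> simp_all [pvMatchTokens, pvRules, pvAnyIn, PySem.List.pyGet?, PySem.List.pyIdx?]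
                  rw [minD_int_eq _ 7 _ hmem hlb]
                  norm_num [pvRules, PySem.Set.update, PySem.List.pyGet?, PySem.List.pyIdx?]
                  exact ⟨rfl, rfl⟩
                | false =>
                  cases h8 : pvAnyIn ["outlier", "iforest", "anomaly", "lof", "svm"] hay with
                  | true =>
                    have hmem : (8 : Int) ∈ pvTokenPrio.items.filterMap (fun tp => if PySem.Str.isIn tp.1 hay then some tp.2 else none) := by
                      simp only [pvAnyIn, List.any_cons, List.any_nil, Bool.or_false, Bool.or_eq_true] at h8
                      rcases h8 with ht|ht|ht|ht|ht
                      · exact List.mem_filterMap.mpr ⟨("outlier", 8), by rw [pvItems_eq]; decide, by simp only [ht]; rfl⟩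
                      · exact List.mem_filterMap.mpr ⟨("iforest", 8), by rw [pvItems_eq]; decide, by simp only [ht]; rfl⟩
                      · exact List.mem_filterMap.mpr ⟨("anomaly", 8), by rw [pvItems_eq]; decide, by simp only [ht]; rfl⟩
                      · exact List.mem_filterMap.mpr ⟨("lof", 8), by rw [pvItems_eq]; decide, by simp only [ht]; rfl⟩
                      · exact absurd h5 (by simp only [pvAnyIn, List.any_cons, ht, Bool.true_or]; simp)
                    have hlb : ∀ p ∈ pvTokenPrio.items.filterMap (fun tp => if PySem.Str.isIn tp.1 hay then some tp.2 else none), (8 : Int) ≤ p := by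
                      intro p hp
                      obtain ⟨hp0, hp9, hm⟩ := pv_mem_ps_bound hay p hp
                      by_contra hlt
                      rw [not_le] at hlt
                      interval_cases p <;> simp_all [pvMatchTokens, pvRules, pvAnyIn, PySem.List.pyGet?, PySem.List.pyIdx?]
                    rw [minD_int_eq _ 8 _ hmem hlb]
                    norm_num [pvRules, PySem.Set.update, PySem.List.pyGet?, PySem.List.pyIdx?]
                    exact ⟨rfl, rfl⟩
                  | false =>
                    cases h9 : pvAnyIn ["arima", "ets", "prophet", "naive", "trend", "croston", "theta"] hay with
                    | true =>
                      have hmem : (9 : Int) ∈ pvTokenPrio.items.filterMap (fun tp => if PySem.Str.isIn tp.1 hay then some tp.2 else none) := by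
                        simp only [pvAnyIn, List.any_cons, List.any_nil, Bool.or_false, Bool.or_eq_true] at h9
                        rcases h9 with ht|ht|ht|ht|ht|ht|ht
                        · exact List.mem_filterMap.mpr ⟨("arima", 9), by rw [pvItems_eq]; decide, by simp only [ht]; rfl⟩
                        · exact List.mem_filterMap.mpr ⟨("ets", 9), by rw [pvItems_eq]; decide, by simp only [ht]; rfl⟩
                        · exact List.mem_filterMap.mpr ⟨("prophet", 9), by rw [pvItems_eq]; decide, by simp only [ht]; rfl⟩
                        · exact List.mem_filterMap.mpr ⟨("naive", 9), by rw [pvItems_eq]; decide, by simp only [ht]; rfl⟩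
                        · exact List.mem_filterMap.mpr ⟨("trend", 9), by rw [pvItems_eq]; decide, by simp only [ht]; rfl⟩
                        · exact List.mem_filterMap.mpr ⟨("croston", 9), by rw [pvItems_eq]; decide, by simp only [ht]; rfl⟩
                        · exact List.mem_filterMap.mpr ⟨("theta", 9), by rw [pvItems_eq]; decide, by simp only [ht]; rfl⟩
                      have hlb : ∀ p ∈ pvTokenPrio.items.filterMap (fun tp => if PySem.Str.isIn tp.1 hay then some tp.2 else none), (9 : Int) ≤ p := by
                        intro p hp
                        obtain ⟨hp0, hp9, hm⟩ := pv_mem_ps_bound hay p hp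
                        by_contra hlt
                        rw [not_le] at hlt
                        interval_cases p <;> simp_all [pvMatchTokens, pvRules, pvAnyIn, PySem.List.pyGet?, PySem.List.pyIdx?]
                      rw [minD_int_eq _ 9 _ hmem hlb]
                      norm_num [pvRules, PySem.Set.update, PySem.List.pyGet?, PySem.List.pyIdx?]
                      exact ⟨rfl, rfl⟩
                    | false =>
                      have hps : pvTokenPrio.items.filterMap (fun tp => if PySem.Str.isIn tp.1 hay then some tp.2 else none) = [] := by
                        rw [pvItems_eq]
                        simp_all [pvAnyIn]
                      rw [hps]
                      norm_num [pvRules, PySem.Set.update, PySem.List.pyGet?, PySem.List.pyIdx?]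


theorem infer_model_family_eq (module_type estimator_id name reference : String) :
    infer_model_family_py module_type estimator_id name reference
      = infer_model_family_py_alt module_type estimator_id name reference := by
  unfold infer_model_family_py infer_model_family_py_alt
  simp only [sel_eq]

-- ===== VERDICT (by name: the statement is the Claim_ definition above) =====
theorem infer_model_family_py_spec : Claim_equal_infer_model_family_py := by
  intro mt eid nm rf _
  unfold Spec_infer_model_family_py
  exact infer_model_family_eq mt eid nm rf
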